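-- pv_equiv track=rewrite | github.com/n-maido/DSA-Bootcamp-Java | lectures/10-binary search/binary-search-nhi/python/binary_search.py | agnostic_bs
-- ===== SOURCE A (Python) =====
-- def agnostic_bs(arr, target):
--     start = 0
--     end = len(arr) - 1
--
--     # determine sort order
--     isAsc = arr[start] < arr[end]
--
--     while start <= end:
--         # find middle index
--         mid = round(start + (end - start) / 2)
--
--         if arr[mid] == target:
--             return mid
--
--         if isAsc:
--             if target < arr[mid]:
--                 # check left side
--                 end = mid - 1;
--             elif target > arr[mid]:
--                 # check right side
--                 start = mid + 1;
--         else: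
--             if target > arr[mid]:
--                 # check left side
--                 end = mid - 1;
--             elif target < arr[mid]:
--                 # check right side
--                 start = mid + 1;
--     return -1
-- ===== SOURCE B (Python) =====
-- def agnostic_bs(arr, target):
--     # recursive divide-and-conquer over a shrinking window; sort order read once from the endpoints
--     is_asc = arr[0] < arr[-1]
--
--     def go(lo, hi):
--         if lo > hi:
--             return -1
--         mid = round(lo + (hi - lo) / 2)
--         v = arr[mid]
--         if v == target:
--             return mid
--         if (target < v) == is_asc:
--             return go(lo, mid - 1)
--         return go(mid + 1, hi)
--
--     return go(0, len(arr) - 1)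
-- ===== Notes on version B (the rewrite author's own statement) =====
-- stated objective: alternative
-- what changed: Replaces the iterative while-loop with mutable start/end state by a recursive divide-and-conquer helper over the shrinking window, and collapses the four isAsc/comparison branches into a single direction test (target < arr[mid]) == is_asc.
-- outside the precondition, e.g. on agnostic_bs([], 5): A raises IndexError, B raises IndexError
import Mathlib
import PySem

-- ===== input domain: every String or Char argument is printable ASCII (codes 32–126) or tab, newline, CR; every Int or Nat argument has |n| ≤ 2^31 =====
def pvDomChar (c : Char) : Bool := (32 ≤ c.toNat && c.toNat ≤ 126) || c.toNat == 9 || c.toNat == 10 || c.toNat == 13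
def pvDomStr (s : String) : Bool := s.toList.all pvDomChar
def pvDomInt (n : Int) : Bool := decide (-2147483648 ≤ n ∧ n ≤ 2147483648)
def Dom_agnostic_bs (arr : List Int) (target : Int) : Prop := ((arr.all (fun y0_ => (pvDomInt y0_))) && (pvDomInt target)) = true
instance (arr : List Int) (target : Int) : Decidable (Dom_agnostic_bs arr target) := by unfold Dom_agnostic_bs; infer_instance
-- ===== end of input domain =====

-- B is an alternative decomposition: a recursive helper over the shrinking window instead of
-- A's while-loop with mutable start/end, with the four direction branches collapsed into one test.
-- Both ports model Python's round(start + (end-start)/2) with pyMid (exact: the half is an exact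
-- float and round ties to even; only called with 0 ≤ s + e here).

-- ===== PORT A =====
-- round(s + (e - s) / 2) = banker's rounding of (s+e)/2; exact for the nonnegative s+e that occur
def pyMid (s e : Int) : Int :=
  let a := s + e
  if a % 2 = 0 then a / 2
  else if (a - 1) / 2 % 2 = 0 then (a - 1) / 2 else (a - 1) / 2 + 1

-- A's while-loop, fuel-guarded (fuel = len+1 always suffices; the unreachable last else keeps
-- the state unchanged exactly as A's fall-through does)
def agnosticLoop (arr : List Int) (target : Int) (isAsc : Bool) : Nat → Int → Int → Int
  | 0, _, _ => -1
  | Nat.succ f, start, stop =>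
    if start ≤ stop then
      let mid := pyMid start stop
      let v := (PySem.List.pyGet? arr mid).getD 0
      if v = target then mid
      else if isAsc then
        if target < v then agnosticLoop arr target isAsc f start (mid - 1)
        else if v < target then agnosticLoop arr target isAsc f (mid + 1) stop
        else agnosticLoop arr target isAsc f start stop
      else
        if v < target then agnosticLoop arr target isAsc f start (mid - 1)
        else if target < v then agnosticLoop arr target isAsc f (mid + 1) stop
        else agnosticLoop arr target isAsc f start stop
    else -1

def agnostic_bs (arr : List Int) (target : Int) : Int :=
  let start : Int := 0
  let stop : Int := (arr.length : Int) - 1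
  let isAsc : Bool := decide ((PySem.List.pyGet? arr start).getD 0 < (PySem.List.pyGet? arr stop).getD 0)
  agnosticLoop arr target isAsc (arr.length + 1) start stop

-- ===== PORT B =====
theorem pyMid_bounds (s e : Int) (h : s ≤ e) : s ≤ pyMid s e ∧ pyMid s e ≤ e := by
  unfold pyMid; dsimp only; split_ifs <;> omega

def agnosticGo (arr : List Int) (target : Int) (isAsc : Bool) (lo hi : Int) : Int :=
  if lo > hi then -1
  else
    let mid := pyMid lo hi
    let v := (PySem.List.pyGet? arr mid).getD 0
    if v = target then mid
    else if decide (target < v) = isAsc then agnosticGo arr target isAsc lo (mid - 1)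
    else agnosticGo arr target isAsc (mid + 1) hi
termination_by (hi + 1 - lo).toNat
decreasing_by
  all_goals
    have := pyMid_bounds lo hi (by omega)
    omega

def agnostic_bs_alt (arr : List Int) (target : Int) : Int :=
  let isAsc : Bool := decide ((PySem.List.pyGet? arr 0).getD 0 < (PySem.List.pyGet? arr (-1)).getD 0)
  agnosticGo arr target isAsc 0 ((arr.length : Int) - 1)

-- ===== PRECONDITION & SPEC =====
-- Pre_ excludes only the empty list, on which Python A raises IndexError at arr[start]
def Pre_agnostic_bs (arr : List Int) (target : Int) : Prop := arr ≠ []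
instance (arr : List Int) (target : Int) : Decidable (Pre_agnostic_bs arr target) := by unfold Pre_agnostic_bs; infer_instance
def pvWitness_agnostic_bs : List Int × Int := ([1, 3, 5, 7], 5)

def Spec_agnostic_bs (arr : List Int) (target : Int) (out : Int) : Prop := out = agnostic_bs_alt arr target
instance (arr : List Int) (target : Int) (out : Int) : Decidable (Spec_agnostic_bs arr target out) := by unfold Spec_agnostic_bs; infer_instance

-- ===== CLAIM (what is proved, stated in full; the proofs are below) =====
def Claim_equal_agnostic_bs : Prop := ∀ (arr : List Int) (target : Int), Dom_agnostic_bs arr target → Pre_agnostic_bs arr target → Spec_agnostic_bs arr target (agnostic_bs arr target)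

-- ===== LEMMAS AND PROOFS =====

-- the fuel-guarded loop of A computes B's recursion whenever the fuel covers the window
theorem loop_eq_go (arr : List Int) (target : Int) (isAsc : Bool) :
    ∀ (f : Nat) (lo hi : Int), (hi + 1 - lo).toNat ≤ f →
      agnosticLoop arr target isAsc f lo hi = agnosticGo arr target isAsc lo hi := by
  intro f
  induction f with
  | zero =>
    intro lo hi h
    have hlt : hi < lo := by omega
    rw [agnosticGo]
    simp [agnosticLoop, hlt]
  | succ f ih =>
    intro lo hi h
    rw [agnosticGo]
    by_cases hle : lo ≤ hi
    · have hb := pyMid_bounds lo hi hle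
      simp only [agnosticLoop, if_pos hle, if_neg (by omega : ¬ lo > hi)]
      set mid := pyMid lo hi with hmid
      set v := (PySem.List.pyGet? arr mid).getD 0 with hv
      by_cases hvt : v = target
      · simp [hvt]
      · simp only [if_neg hvt]
        rcases lt_trichotomy target v with h1 | h1 | h1
        · have h2 : ¬ v < target := by omega
          cases isAsc <;>
            simp [h1, h2, ih lo (mid - 1) (by omega), ih (mid + 1) hi (by omega)]
        · exact absurd h1.symm hvt
        · have h2 : ¬ target < v := by omega
          cases isAsc <;>
            simp [h1, h2, ih lo (mid - 1) (by omega), ih (mid + 1) hi (by omega)]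
    · simp [agnosticLoop, hle, if_pos (by omega : lo > hi)]

-- on a nonempty list, arr[-1] and arr[len-1] are the same element
theorem pyGet_neg_one_eq (arr : List Int) (h : arr ≠ []) :
    PySem.List.pyGet? arr (-1) = PySem.List.pyGet? arr ((arr.length : Int) - 1) := by
  have hlen : 0 < arr.length := List.length_pos_iff.mpr h
  rw [PySem.List.pyGet?_neg_one]
  have hc : ((arr.length : Int) - 1) = ((arr.length - 1 : Nat) : Int) := by omega
  rw [hc, PySem.List.pyGet?_natCast, List.getLast?_eq_getElem?]

-- ===== VERDICT (by name: the statement is the Claim_ definition above) =====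
theorem agnostic_bs_spec : Claim_equal_agnostic_bs := by
  intro arr target _ hpre
  unfold Spec_agnostic_bs agnostic_bs agnostic_bs_alt
  dsimp only
  rw [pyGet_neg_one_eq arr hpre]
  exact loop_eq_go arr target _ (arr.length + 1) 0 ((arr.length : Int) - 1) (by omega)
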